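-- pv_equiv track=rewrite | github.com/zanefry/adventofcode2022 | 13/part1.py | list_elements
-- ===== SOURCE A (Python) =====
-- def list_elements(s: str) -> list[str]:
--     s = s[1:-1]
--     if not s:
--         return []
--
--     elements = [[]]
--     nest_level = 0
--     for char in s:
--         if nest_level == 0 and char == ',':
--             elements.append([])
--         else:
--             elements[-1].append(char)
--
--         if char == '[':
--             nest_level += 1
--         elif char == ']':
--             nest_level -= 1
--
--     return [''.join(e) for e in elements]
-- ===== SOURCE B (Python) =====
-- def list_elements(s: str) -> list[str]:
--     inner = s[1:-1]
--     if not inner: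
--         return []
--     nest = 0
--     cuts = []
--     i = 0
--     for ch in inner:
--         if nest == 0 and ch == ',':
--             cuts.append(i)
--         elif ch == '[':
--             nest += 1
--         elif ch == ']':
--             nest -= 1
--         i += 1
--     parts = []
--     prev = 0
--     for c in cuts:
--         parts.append(inner[prev:c])
--         prev = c + 1
--     parts.append(inner[prev:])
--     return parts
-- ===== Notes on version B (the rewrite author's own statement) =====
-- stated objective: alternative
-- what changed: Instead of growing a list-of-char-lists in one fold (appending each char to the last element, then joining), B makes two passes: first it records the absolute indices of top-level commas while tracking nesting, then it slices the inner string between consecutive cut indices.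
import Mathlib
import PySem

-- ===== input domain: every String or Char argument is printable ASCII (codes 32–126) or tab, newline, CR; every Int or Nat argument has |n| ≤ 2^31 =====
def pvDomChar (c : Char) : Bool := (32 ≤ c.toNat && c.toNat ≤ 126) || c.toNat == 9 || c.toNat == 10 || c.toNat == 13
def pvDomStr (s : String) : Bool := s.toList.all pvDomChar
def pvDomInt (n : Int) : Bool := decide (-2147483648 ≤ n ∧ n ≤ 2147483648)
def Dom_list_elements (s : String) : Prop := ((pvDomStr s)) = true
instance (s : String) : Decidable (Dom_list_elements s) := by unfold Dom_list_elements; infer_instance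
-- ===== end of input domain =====

-- B records top-level comma indices in one pass and then slices between them,
-- instead of A's single fold that appends each char to the last of a list of char lists.

-- ===== PORT A =====
-- elements[-1].append(char): append c to the last list of es
def pvAppendLast : List (List Char) → Char → List (List Char)
  | [], c => [[c]]            -- unreachable (es starts at [[]] and never shrinks)
  | [e], c => [e ++ [c]]
  | e :: rest, c => e :: pvAppendLast rest c

-- the body of A's for-loop, state = (elements, nest_level)
def pvStepA : (List (List Char) × Int) → Char → (List (List Char) × Int) :=
  fun st c =>
    let es' := if st.2 == 0 && c == ',' then st.1 ++ [[]] else pvAppendLast st.1 c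
    let n' := if c == '[' then st.2 + 1 else if c == ']' then st.2 - 1 else st.2
    (es', n')

def list_elements (s : String) : List String :=
  let inner := PySem.Chars.slice s.toList (some 1) (some (-1))   -- s[1:-1]
  if inner = [] then []
  else ((inner.foldl pvStepA ([[]], 0)).1).map String.ofList          -- ''.join(e)

-- ===== PORT B =====
-- first loop of B, state = (nest, cuts, i)
def pvCutsStep : (Int × List Nat × Nat) → Char → (Int × List Nat × Nat) :=
  fun st ch =>
    if st.1 == 0 && ch == ',' then (st.1, st.2.1 ++ [st.2.2], st.2.2 + 1)
    else if ch == '[' then (st.1 + 1, st.2.1, st.2.2 + 1)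
    else if ch == ']' then (st.1 - 1, st.2.1, st.2.2 + 1)
    else (st.1, st.2.1, st.2.2 + 1)

-- second loop of B over cuts, state = (prev, parts); inner[prev:c] with
-- 0 ≤ prev ≤ c is exactly (drop prev).take (c - prev), and inner[prev:] is drop prev
def pvPartsLoop : List Char → Nat → List (List Char) → List Nat → List (List Char)
  | t, prev, parts, [] => parts ++ [t.drop prev]
  | t, prev, parts, c :: cs => pvPartsLoop t (c + 1) (parts ++ [(t.drop prev).take (c - prev)]) cs

def list_elements_alt (s : String) : List String :=
  let inner := PySem.Chars.slice s.toList (some 1) (some (-1))   -- s[1:-1]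
  if inner = [] then []
  else
    let cuts := (inner.foldl pvCutsStep (0, [], 0)).2.1
    (pvPartsLoop inner 0 [] cuts).map String.ofList

-- ===== PRECONDITION & SPEC =====
def Spec_list_elements (s : String) (out : List String) : Prop := out = list_elements_alt s
instance (s : String) (out : List String) : Decidable (Spec_list_elements s out) := by unfold Spec_list_elements; infer_instance

-- ===== CLAIM (what is proved, stated in full; the proofs are below) =====
def Claim_equal_list_elements : Prop := ∀ (s : String), Dom_list_elements s → Spec_list_elements s (list_elements s)

-- ===== LEMMAS AND PROOFS =====

-- the nesting update of one character
def pvUpd (n : Int) (c : Char) : Int :=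
  if c == '[' then n + 1 else if c == ']' then n - 1 else n

-- index of the first top-level comma, scanning from absolute index i with nesting n
def pvFindCut : Int → Nat → List Char → Option Nat
  | _, _, [] => none
  | n, i, c :: rest =>
    if n == 0 && c == ',' then some i
    else pvFindCut (pvUpd n c) (i + 1) rest

theorem pvFindCut_lt_of_some : ∀ (t : List Char) (n : Int) (i j : Nat),
    pvFindCut n i t = some j → j < i + t.length := by
  intro t
  induction t with
  | nil => intro n i j h; simp [pvFindCut] at h
  | cons c rest ih =>
    intro n i j h
    simp only [pvFindCut] at h
    split at h
    · simp only [Option.some.injEq] at h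
      subst h; simp
    · have := ih _ _ _ h; simp; omega

-- reference splitter: split t at top-level commas, starting with nesting n
def pvSplitN (n : Int) (t : List Char) : List (List Char) :=
  match h : pvFindCut n 0 t with
  | some j => t.take j :: pvSplitN 0 (t.drop (j + 1))
  | none => [t]
termination_by t.length
decreasing_by
  have := pvFindCut_lt_of_some t n 0 j h
  simp [List.length_drop]; omega

-- absolute indices of top-level commas of t, starting at index i with nesting n
def pvCutsAbs : Int → Nat → List Char → List Nat
  | _, _, [] => []
  | n, i, c :: rest =>
    if n == 0 && c == ',' then i :: pvCutsAbs n (i + 1) rest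
    else pvCutsAbs (pvUpd n c) (i + 1) rest

-- prepend x onto the head element
def pvConsHead (x : List Char) : List (List Char) → List (List Char)
  | [] => [x]
  | h :: t => (x ++ h) :: t

theorem pvSplitN_of_none {n : Int} {t : List Char} (hf : pvFindCut n 0 t = none) :
    pvSplitN n t = [t] := by
  rw [pvSplitN]; split <;> simp_all

theorem pvSplitN_of_some {n : Int} {t : List Char} {j : Nat} (hf : pvFindCut n 0 t = some j) :
    pvSplitN n t = t.take j :: pvSplitN 0 (t.drop (j + 1)) := by
  rw [pvSplitN]; split <;> simp_all

theorem pvSplitN_ne_nil (n : Int) (t : List Char) : pvSplitN n t ≠ [] := by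
  unfold pvSplitN; split <;> simp

theorem pvConsHead_nil {L : List (List Char)} (h : L ≠ []) : pvConsHead [] L = L := by
  cases L with
  | nil => exact absurd rfl h
  | cons a l => simp [pvConsHead]

theorem pvConsHead_consHead (x : List Char) (c : Char) (L : List (List Char)) :
    pvConsHead x (pvConsHead [c] L) = pvConsHead (x ++ [c]) L := by
  cases L <;> simp [pvConsHead]

theorem pvFindCut_shift : ∀ (t : List Char) (n : Int) (i : Nat),
    pvFindCut n (i + 1) t = (pvFindCut n i t).map (· + 1) := by
  intro t
  induction t with
  | nil => intro n i; simp [pvFindCut]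
  | cons c rest ih =>
    intro n i
    simp only [pvFindCut]
    split
    · simp
    · exact ih _ _

theorem pvSplitN_cons_of_not_comma (n : Int) (c : Char) (rest : List Char)
    (h : ¬ (n == 0 && c == ',') = true) :
    pvSplitN n (c :: rest) =
      pvConsHead [c] (pvSplitN (pvUpd n c) rest) := by
  have hf : pvFindCut n 0 (c :: rest) =
      (pvFindCut (pvUpd n c) 0 rest).map (· + 1) := by
    simp only [pvFindCut, h]
    exact pvFindCut_shift rest _ 0
  cases hr : pvFindCut (pvUpd n c) 0 rest with
  | none =>
    rw [hr, Option.map_none] at hf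
    rw [pvSplitN_of_none hf, pvSplitN_of_none hr, pvConsHead]
    simp
  | some j =>
    rw [hr, Option.map_some] at hf
    rw [pvSplitN_of_some hf, pvSplitN_of_some hr, pvConsHead]
    simp

theorem pvSplitN_comma (rest : List Char) : pvSplitN 0 (',' :: rest) = [] :: pvSplitN 0 rest := by
  have : pvFindCut 0 0 (',' :: rest) = some 0 := by simp [pvFindCut]
  rw [pvSplitN_of_some this]
  simp

def pvLast : List (List Char) → List Char
  | [] => []
  | [e] => e
  | _ :: rest => pvLast rest

theorem pvLast_cons₂ (a b : List Char) (l : List (List Char)) :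
    pvLast (a :: b :: l) = pvLast (b :: l) := rfl

theorem pvLast_concat : ∀ (xs : List (List Char)) (y : List Char), pvLast (xs ++ [y]) = y := by
  intro xs y
  induction xs with
  | nil => rfl
  | cons a tl ih =>
    cases htl : tl ++ [y] with
    | nil => simp at htl
    | cons b l =>
      rw [List.cons_append, htl]
      show pvLast (b :: l) = y
      rw [← htl, ih]

theorem pvDropLast_pvLast : ∀ (es : List (List Char)), es ≠ [] →
    es.dropLast ++ [pvLast es] = es := by
  intro es
  induction es with
  | nil => intro h; exact absurd rfl h
  | cons e tl ih =>
    intro _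
    cases tl with
    | nil => simp [pvLast]
    | cons f r =>
      rw [pvLast_cons₂]
      have := ih (by simp)
      simp only [List.dropLast_cons₂, List.cons_append, this]

theorem pvAppendLast_eq : ∀ (es : List (List Char)) (c : Char), es ≠ [] →
    pvAppendLast es c = es.dropLast ++ [pvLast es ++ [c]] := by
  intro es
  induction es with
  | nil => intro c h; exact absurd rfl h
  | cons e tl ih =>
    intro c _
    cases tl with
    | nil => simp [pvAppendLast, pvLast]
    | cons f r =>
      rw [pvLast_cons₂]
      simp only [pvAppendLast, ih c (by simp), List.dropLast_cons₂, List.cons_append]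

-- A's fold computes pvSplitN, up to the accumulated elements
theorem foldA_eq : ∀ (t : List Char) (es : List (List Char)) (n : Int), es ≠ [] →
    (t.foldl pvStepA (es, n)).1 = es.dropLast ++ pvConsHead (pvLast es) (pvSplitN n t) := by
  intro t
  induction t with
  | nil =>
    intro es n h
    rw [pvSplitN_of_none (by simp [pvFindCut])]
    simp only [List.foldl_nil, pvConsHead]
    simp [pvDropLast_pvLast es h]
  | cons c rest ih =>
    intro es n h
    rw [List.foldl_cons]
    by_cases hc : (n == 0 && c == ',') = true
    · have hn : n = 0 := by simp at hc; exact_mod_cast hc.1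
      have hch : c = ',' := by simp at hc; exact hc.2
      subst hn; subst hch
      have hstep : pvStepA (es, (0 : Int)) ',' = (es ++ [[]], (0 : Int)) := by
        simp [pvStepA]
      rw [hstep, ih (es ++ [[]]) 0 (by simp)]
      rw [List.dropLast_concat, pvLast_concat,
        pvConsHead_nil (pvSplitN_ne_nil 0 rest), pvSplitN_comma]
      simp only [pvConsHead, List.append_nil]
      conv_lhs => rw [← pvDropLast_pvLast es h]
      simp
    · have hstep : pvStepA (es, n) c = (pvAppendLast es c, pvUpd n c) := by
        simp [pvStepA, pvUpd, hc]
      rw [hstep, ih (pvAppendLast es c) _ (by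
        rw [pvAppendLast_eq es c h]; simp)]
      rw [pvAppendLast_eq es c h]
      rw [List.dropLast_concat, pvLast_concat,
        pvSplitN_cons_of_not_comma n c rest hc, pvConsHead_consHead]

-- the cuts fold computes pvCutsAbs
theorem foldCuts_eq : ∀ (t : List Char) (n : Int) (acc : List Nat) (i : Nat),
    (t.foldl pvCutsStep (n, acc, i)).2.1 = acc ++ pvCutsAbs n i t := by
  intro t
  induction t with
  | nil => intro n acc i; simp [pvCutsAbs]
  | cons c rest ih =>
    intro n acc i
    rw [List.foldl_cons]
    by_cases hc : (n == 0 && c == ',') = true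
    · have hch : c = ',' := by simp at hc; exact hc.2
      have : pvCutsStep (n, acc, i) c = (n, acc ++ [i], i + 1) := by simp [pvCutsStep, hc]
      rw [this, ih]
      simp [pvCutsAbs, hc]
    · have : pvCutsStep (n, acc, i) c = (pvUpd n c, acc, i + 1) := by
        by_cases h1 : (c == '[') = true
        · simp [pvCutsStep, pvUpd, hc, h1]
        · by_cases h2 : (c == ']') = true
          · simp [pvCutsStep, pvUpd, hc, h1, h2]
          · simp [pvCutsStep, pvUpd, hc, h1, h2]
      rw [this, ih]
      simp [pvCutsAbs, hc]

-- pvCutsAbs characterised through pvFindCut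
theorem pvCutsAbs_eq_findCut : ∀ (t : List Char) (n : Int) (i : Nat),
    pvCutsAbs n i t = match pvFindCut n 0 t with
      | none => []
      | some j => (i + j) :: pvCutsAbs 0 (i + j + 1) (t.drop (j + 1)) := by
  intro t
  induction t with
  | nil => intro n i; simp [pvCutsAbs, pvFindCut]
  | cons c rest ih =>
    intro n i
    by_cases hc : (n == 0 && c == ',') = true
    · have hn : n = 0 := by simp at hc; exact_mod_cast hc.1
      have hch : c = ',' := by simp at hc; exact hc.2
      subst hn hch
      simp [pvCutsAbs, pvFindCut]
    · have hf : pvFindCut n 0 (c :: rest) =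
          (pvFindCut (pvUpd n c) 0 rest).map (· + 1) := by
        simp only [pvFindCut, hc]
        exact pvFindCut_shift rest _ 0
      have hl : pvCutsAbs n i (c :: rest) = pvCutsAbs (pvUpd n c) (i + 1) rest := by
        simp [pvCutsAbs, hc]
      rw [hl, hf, ih]
      cases hr : pvFindCut (pvUpd n c) 0 rest with
      | none => simp
      | some j =>
        simp only [Option.map_some]
        have h1 : i + 1 + j = i + (j + 1) := by omega
        have h2 : i + 1 + j + 1 = i + (j + 1) + 1 := by omega
        simp [h1]

-- plain recursive form of B's slicing loop
def pvSliceParts : List Char → Nat → List Nat → List (List Char)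
  | t, prev, [] => [t.drop prev]
  | t, prev, c :: cs => (t.drop prev).take (c - prev) :: pvSliceParts t (c + 1) cs

theorem pvPartsLoop_eq : ∀ (cs : List Nat) (t : List Char) (prev : Nat) (parts : List (List Char)),
    pvPartsLoop t prev parts cs = parts ++ pvSliceParts t prev cs := by
  intro cs
  induction cs with
  | nil => intro t prev parts; simp [pvPartsLoop, pvSliceParts]
  | cons c cs ih => intro t prev parts; simp [pvPartsLoop, pvSliceParts, ih]

-- slicing between the cut indices yields pvSplitN
theorem pvSliceParts_eq : ∀ (m : Nat) (t u : List Char) (n : Int), t.length ≤ m →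
    pvSliceParts (u ++ t) u.length (pvCutsAbs n u.length t) = pvSplitN n t := by
  intro m
  induction m with
  | zero =>
    intro t u n hm
    have ht : t = [] := by cases t <;> simp_all
    subst ht
    rw [pvSplitN_of_none (by simp [pvFindCut])]
    simp [pvCutsAbs, pvSliceParts]
  | succ m ih =>
    intro t u n hm
    rw [pvCutsAbs_eq_findCut]
    cases hf : pvFindCut n 0 t with
    | none =>
      rw [pvSplitN_of_none hf]
      simp [pvSliceParts]
    | some j =>
      have hj : j < t.length := by have := pvFindCut_lt_of_some t n 0 j hf; omega
      rw [pvSplitN_of_some hf]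
      simp only [pvSliceParts]
      have htake : ((u ++ t).drop u.length).take (u.length + j - u.length) = t.take j := by
        simp
      rw [htake]
      have hlen : (u ++ t.take (j + 1)).length = u.length + j + 1 := by
        simp [List.length_take]; omega
      have happ : (u ++ t.take (j + 1)) ++ t.drop (j + 1) = u ++ t := by
        simp
      have := ih (t.drop (j + 1)) (u ++ t.take (j + 1)) 0 (by simp [List.length_drop]; omega)
      rw [hlen, happ] at this
      rw [this]

-- ===== VERDICT (by name: the statement is the Claim_ definition above) =====
theorem list_elements_spec : Claim_equal_list_elements := by
  intro s _
  unfold Spec_list_elements list_elements list_elements_alt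
  set inner := PySem.Chars.slice s.toList (some 1) (some (-1)) with hinner
  by_cases h : inner = []
  · simp [h]
  · simp only [h, if_neg, not_false_iff]
    congr 1
    have hA := foldA_eq inner [[]] 0 (by simp)
    simp only [List.dropLast, pvLast] at hA
    rw [pvConsHead_nil (pvSplitN_ne_nil 0 inner)] at hA
    have hcuts := foldCuts_eq inner 0 [] 0
    simp only [List.nil_append] at hcuts
    have hB := pvSliceParts_eq inner.length inner [] 0 (le_refl _)
    simp only [List.nil_append, List.length_nil] at hB
    rw [hA, hcuts, pvPartsLoop_eq]
    simp [hB]
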